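-- pv_equiv track=rewrite | github.com/jpwahle/abcde | helpers.py | compute_cognitive_features
-- ===== SOURCE A (Python) =====
-- from typing import Any, Callable, Dict, List, Optional, Pattern, Tuple, Set
--
-- def compute_cognitive_features(
--     text: str, cog_dict: Dict[str, Set[str]]
-- ) -> Dict[str, int]:
--     if not isinstance(text, str) or not text.strip():
--         return {f"COGHas{cat}Word": 0 for cat in cog_dict}
--     words = set(text.lower().split())
--     return {
--         f"COGHas{cat}Word": int(bool(words & terms))
--         for cat, terms in cog_dict.items()
--     }
-- ===== SOURCE B (Python) =====
-- def compute_cognitive_features(text, cog_dict):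
--     if not isinstance(text, str) or not text.strip():
--         return {f"COGHas{cat}Word": 0 for cat in cog_dict}
--     # inverted index: term -> list of categories containing it
--     pairs = [(term, cat) for cat, terms in cog_dict.items() for term in terms]
--     index = {}
--     for term, cat in pairs:
--         index[term] = index.get(term, []) + [cat]
--     hits = set()
--     for word in set(text.lower().split()):
--         hits.update(index.get(word, []))
--     return {f"COGHas{cat}Word": int(cat in hits) for cat in cog_dict}
-- ===== Notes on version B (the rewrite author's own statement) =====
-- stated objective: alternative
-- what changed: B replaces A's per-category set intersection with an inverted index (term -> categories) plus a hit-set filled by looking up each word of the text, the result dict being initialised from the category order.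
import Mathlib
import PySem

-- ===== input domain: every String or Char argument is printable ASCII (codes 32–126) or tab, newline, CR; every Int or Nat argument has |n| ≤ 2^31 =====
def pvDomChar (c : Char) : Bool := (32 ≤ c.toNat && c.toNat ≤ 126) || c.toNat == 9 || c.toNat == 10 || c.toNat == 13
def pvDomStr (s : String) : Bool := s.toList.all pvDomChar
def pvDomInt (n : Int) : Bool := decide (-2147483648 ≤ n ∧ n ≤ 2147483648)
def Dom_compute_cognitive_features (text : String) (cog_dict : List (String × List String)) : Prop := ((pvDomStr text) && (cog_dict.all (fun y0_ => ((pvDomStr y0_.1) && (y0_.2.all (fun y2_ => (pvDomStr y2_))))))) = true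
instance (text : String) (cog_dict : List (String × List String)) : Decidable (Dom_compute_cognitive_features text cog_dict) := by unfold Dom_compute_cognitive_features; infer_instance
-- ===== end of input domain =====

-- B rebuilds the same answer through an inverted index (term → categories) and a hit-set,
-- instead of intersecting each category's term set with the word set (objective: alternative).

-- ===== PORT A =====
def compute_cognitive_features (text : String) (cog_dict : List (String × List String)) : List (String × Int) :=
  if PySem.Str.strip text = "" then
    (cog_dict.foldl (fun d p => d.insert ("COGHas" ++ p.1 ++ "Word") 0)
      (PySem.Dict.empty : PySem.Dict String Int)).items
  else
    let words : PySem.Set String := PySem.Set.ofList (PySem.Str.split₀ (PySem.Str.lower text))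
    (cog_dict.foldl (fun d p => d.insert ("COGHas" ++ p.1 ++ "Word")
        (if PySem.Set.inter words p.2 = ([] : List String) then (0 : Int) else 1))
      (PySem.Dict.empty : PySem.Dict String Int)).items

-- ===== PORT B =====
def compute_cognitive_features_alt (text : String) (cog_dict : List (String × List String)) : List (String × Int) :=
  if PySem.Str.strip text = "" then
    (cog_dict.foldl (fun d p => d.insert ("COGHas" ++ p.1 ++ "Word") 0)
      (PySem.Dict.empty : PySem.Dict String Int)).items
  else
    let pairs : List (String × String) := cog_dict.flatMap (fun p => p.2.map (fun t => (t, p.1)))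
    let index : PySem.Dict String (List String) :=
      pairs.foldl (fun d q => d.modify q.1 [] (fun l => l ++ [q.2])) PySem.Dict.empty
    let words : PySem.Set String := PySem.Set.ofList (PySem.Str.split₀ (PySem.Str.lower text))
    let hits : PySem.Set String :=
      words.foldl (fun s w => PySem.Set.update s (index.getD w [])) PySem.Set.empty
    (cog_dict.foldl (fun d p => d.insert ("COGHas" ++ p.1 ++ "Word")
        (if PySem.Set.contains hits p.1 then (1 : Int) else 0))
      (PySem.Dict.empty : PySem.Dict String Int)).items

-- ===== PRECONDITION & SPEC =====
-- Pre_ excludes association lists with duplicate category keys: cog_dict is a Python dict,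
-- so duplicate keys cannot arise from any actual Python argument.
def Pre_compute_cognitive_features (text : String) (cog_dict : List (String × List String)) : Prop :=
  (cog_dict.map Prod.fst).Nodup
instance (text : String) (cog_dict : List (String × List String)) : Decidable (Pre_compute_cognitive_features text cog_dict) := by unfold Pre_compute_cognitive_features; infer_instance

def pvWitness_compute_cognitive_features : String × (List (String × List String)) :=
  ("the Red fox", [("Color", ["red", "blue"]), ("Animal", ["cat"])])

def Spec_compute_cognitive_features (text : String) (cog_dict : List (String × List String)) (out : List (String × Int)) : Prop := out = compute_cognitive_features_alt text cog_dict
instance (text : String) (cog_dict : List (String × List String)) (out : List (String × Int)) : Decidable (Spec_compute_cognitive_features text cog_dict out) := by unfold Spec_compute_cognitive_features; infer_instance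

-- ===== CLAIM (what is proved, stated in full; the proofs are below) =====
def Claim_equal_compute_cognitive_features : Prop := ∀ (text : String) (cog_dict : List (String × List String)), Dom_compute_cognitive_features text cog_dict → Pre_compute_cognitive_features text cog_dict → Spec_compute_cognitive_features text cog_dict (compute_cognitive_features text cog_dict)

-- ===== LEMMAS AND PROOFS =====

-- the key-renaming cat ↦ "COGHas" ++ cat ++ "Word" is injective
theorem pv_key_inj : ∀ a b : String, "COGHas" ++ a ++ "Word" = "COGHas" ++ b ++ "Word" → a = b := by
  intro a b h
  have h' := congrArg String.toList h
  simp [String.toList_append] at h'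
  exact String.toList_inj.mp h'

-- membership in the folded hit-set
theorem pv_mem_foldl_update {α : Type} [BEq α] [LawfulBEq α] (g : α → List α) :
    ∀ (l : List α) (s : PySem.Set α) (y : α),
      y ∈ l.foldl (fun s w => PySem.Set.update s (g w)) s ↔ y ∈ s ∨ ∃ w ∈ l, y ∈ g w := by
  intro l
  induction l with
  | nil => simp
  | cons w l ih =>
    intro s y
    simp only [List.foldl_cons, ih, PySem.Set.mem_update, List.mem_cons]
    constructor
    · rintro ((h | h) | ⟨v, hv, hy⟩)
      · exact Or.inl h
      · exact Or.inr ⟨w, Or.inl rfl, h⟩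
      · exact Or.inr ⟨v, Or.inr hv, hy⟩
    · rintro (h | ⟨v, (rfl | hv), hy⟩)
      · exact Or.inl (Or.inl h)
      · exact Or.inl (Or.inr hy)
      · exact Or.inr ⟨v, hv, hy⟩

-- items of the final dict-comprehension fold, for any value function
theorem pv_items_comprehension (cog_dict : List (String × List String))
    (f : String × List String → Int) (hnd : (cog_dict.map Prod.fst).Nodup) :
    (cog_dict.foldl (fun d p => d.insert ("COGHas" ++ p.1 ++ "Word") (f p))
        (PySem.Dict.empty : PySem.Dict String Int)).items
      = cog_dict.map (fun p => ("COGHas" ++ p.1 ++ "Word", f p)) := by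
  have hkeys : (cog_dict.map (fun p : String × List String => "COGHas" ++ p.1 ++ "Word")).Nodup := by
    have : cog_dict.map (fun p : String × List String => "COGHas" ++ p.1 ++ "Word")
        = (cog_dict.map Prod.fst).map (fun c => "COGHas" ++ c ++ "Word") := by
      simp [List.map_map, Function.comp]
    rw [this]
    exact hnd.map (fun a b h => pv_key_inj a b h)
  have h := PySem.Dict.items_foldl_insert_fresh
      (l := cog_dict) (k := fun p => "COGHas" ++ p.1 ++ "Word") (v := f)
      (d := PySem.Dict.empty)
      (by intro a _; simp [PySem.Dict.contains_empty]) hkeys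
  simpa [PySem.Dict.items] using h

-- a pair of cog_dict is determined by its key when keys are Nodup
theorem pv_pair_unique {cog_dict : List (String × List String)}
    (hnd : (cog_dict.map Prod.fst).Nodup) {p r : String × List String}
    (hp : p ∈ cog_dict) (hr : r ∈ cog_dict) (h : r.1 = p.1) : r = p :=
  List.inj_on_of_nodup_map hnd hr hp h

-- category p.1 lands in the hit-set iff some word of `words` is one of p.2's terms
theorem pv_hits_iff (cog_dict : List (String × List String))
    (hnd : (cog_dict.map Prod.fst).Nodup) (words : List String)
    {p : String × List String} (hp : p ∈ cog_dict) :
    (p.1 ∈ words.foldl (fun s w => PySem.Set.update s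
        ((cog_dict.flatMap (fun r => r.2.map (fun t => (t, r.1)))).foldl
            (fun d q => d.modify q.1 [] (fun l => l ++ [q.2])) PySem.Dict.empty |>.getD w []))
        PySem.Set.empty)
      ↔ ∃ w ∈ words, w ∈ p.2 := by
  rw [pv_mem_foldl_update]
  have hget : ∀ w : String,
      ((cog_dict.flatMap (fun r => r.2.map (fun t => (t, r.1)))).foldl
          (fun d q => d.modify q.1 [] (fun l => l ++ [q.2])) PySem.Dict.empty).getD w []
        = ((cog_dict.flatMap (fun r => r.2.map (fun t => (t, r.1)))).filter
            (fun q => q.1 == w)).map Prod.snd := by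
    intro w
    have h := PySem.Dict.getD_foldl_modify_append
        (l := cog_dict.flatMap (fun r => r.2.map (fun t => (t, r.1))))
        (d := (PySem.Dict.empty : PySem.Dict String (List String))) (c := w)
    simpa [PySem.Dict.getD_empty] using h
  constructor
  · rintro (h | ⟨w, hw, hmem⟩)
    · simp [PySem.Set.empty] at h
    · rw [hget] at hmem
      simp only [List.mem_map, List.mem_filter, List.mem_flatMap, beq_iff_eq] at hmem
      obtain ⟨q, ⟨⟨r, hr, t, ht, rfl⟩, hq1⟩, hq2⟩ := hmem
      simp only at hq1 hq2
      have : r = p := pv_pair_unique hnd hp hr hq2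
      subst this
      exact ⟨w, hw, by rw [← hq1]; exact ht⟩
  · rintro ⟨w, hw, ht⟩
    refine Or.inr ⟨w, hw, ?_⟩
    rw [hget]
    simp only [List.mem_map, List.mem_filter, List.mem_flatMap, beq_iff_eq]
    exact ⟨(w, p.1), ⟨⟨p, hp, w, ht, rfl⟩, rfl⟩, rfl⟩

-- the intersection with a Set is nonempty iff witnesses exist
theorem pv_inter_ne_nil {s t : List String} :
    PySem.Set.inter s t ≠ [] ↔ ∃ w ∈ s, w ∈ t := by
  constructor
  · intro h
    rcases List.exists_mem_of_ne_nil _ h with ⟨y, hy⟩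
    exact ⟨y, (PySem.Set.mem_inter _ _ _).mp hy⟩
  · rintro ⟨w, hw, ht⟩ hnil
    have : w ∈ PySem.Set.inter s t := (PySem.Set.mem_inter _ _ _).mpr ⟨hw, ht⟩
    simp [hnil] at this

-- ===== VERDICT (by name: the statement is the Claim_ definition above) =====
theorem compute_cognitive_features_spec : Claim_equal_compute_cognitive_features := by
  intro text cog_dict _ hpre
  unfold Spec_compute_cognitive_features compute_cognitive_features compute_cognitive_features_alt
  by_cases hguard : PySem.Str.strip text = ""
  · simp [hguard]
  · simp only [hguard, if_false]
    rw [pv_items_comprehension _ _ hpre, pv_items_comprehension _ _ hpre]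
    apply List.map_congr_left
    intro p hp
    have hiff := pv_hits_iff cog_dict hpre (PySem.Set.ofList (PySem.Str.split₀ (PySem.Str.lower text))) hp
    simp only [Prod.mk.injEq]
    refine ⟨trivial, ?_⟩
    by_cases hex : ∃ w ∈ (PySem.Set.ofList (PySem.Str.split₀ (PySem.Str.lower text)) : List String), w ∈ p.2
    · rw [if_neg (pv_inter_ne_nil.mpr hex), if_pos ((PySem.Set.contains_iff _ _).mpr (hiff.mpr hex))]
    · rw [if_pos (by by_contra hne; exact hex (pv_inter_ne_nil.mp hne)),
          if_neg (fun hc => hex (hiff.mp ((PySem.Set.contains_iff _ _).mp hc)))]
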